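-- pv_equiv track=rewrite | github.com/pypi-data/pypi-mirror-398 | packages/sloppy-json/sloppy_json-0.2.0-py3-none-any.whl/sloppy_json/parser.py | _serialize_string
-- ===== SOURCE A (Python) =====
-- def _serialize_string(s: str) -> str:
--     """Serialize a string value with proper escaping.
--
--     The string may already contain escape sequences from parsing,
--     so we need to be careful not to double-escape.
--     """
--     result = ['"']
--     i = 0
--     while i < len(s):
--         char = s[i]
--         if char == '"':
--             result.append('\\"')
--         elif char == "\\":
--             # Already an escape sequence - copy as-is
--             if i + 1 < len(s):
--                 next_char = s[i + 1]
--                 if next_char in 'nrtbf"\\/':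
--                     result.append("\\")
--                     result.append(next_char)
--                     i += 2
--                     continue
--                 elif next_char == "u" and i + 5 < len(s):
--                     # Unicode escape
--                     result.append(s[i : i + 6])
--                     i += 6
--                     continue
--                 elif next_char == "\\":
--                     # Double backslash
--                     result.append("\\\\")
--                     i += 2
--                     continue
--             result.append("\\\\")
--         elif char == "\n":
--             result.append("\\n")
--         elif char == "\r":
--             result.append("\\r")
--         elif char == "\t":
--             result.append("\\t")
--         elif ord(char) < 32:
--             result.append(f"\\u{ord(char):04x}")
--         else:
--             result.append(char)
--         i += 1
--     result.append('"')
--     return "".join(result)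
-- ===== SOURCE B (Python) =====
-- import re
--
-- _TOKEN = re.compile(r'\\[nrtbf"\\/]|\\u[\s\S]{4}|[\s\S]')
--
-- _SIMPLE = {'"': '\\"', '\\': '\\\\', '\n': '\\n', '\r': '\\r', '\t': '\\t'}
--
--
-- def _escape_token(t: str) -> str:
--     if len(t) > 1:
--         return t  # an existing escape sequence: copy verbatim
--     if t in _SIMPLE:
--         return _SIMPLE[t]
--     if ord(t) < 32:
--         return f"\\u{ord(t):04x}"
--     return t
--
--
-- def _serialize_string(s: str) -> str:
--     return '"' + ''.join(_escape_token(t) for t in _TOKEN.findall(s)) + '"'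
-- ===== Notes on version B (the rewrite author's own statement) =====
-- stated objective: idiomatic
-- what changed: Replaced A's manual index-walking while-loop and char-by-char if/elif emitter with a compiled regex alternation (re.findall) that tokenizes the string in one pass, followed by a per-token escape map and join.
import Mathlib
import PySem

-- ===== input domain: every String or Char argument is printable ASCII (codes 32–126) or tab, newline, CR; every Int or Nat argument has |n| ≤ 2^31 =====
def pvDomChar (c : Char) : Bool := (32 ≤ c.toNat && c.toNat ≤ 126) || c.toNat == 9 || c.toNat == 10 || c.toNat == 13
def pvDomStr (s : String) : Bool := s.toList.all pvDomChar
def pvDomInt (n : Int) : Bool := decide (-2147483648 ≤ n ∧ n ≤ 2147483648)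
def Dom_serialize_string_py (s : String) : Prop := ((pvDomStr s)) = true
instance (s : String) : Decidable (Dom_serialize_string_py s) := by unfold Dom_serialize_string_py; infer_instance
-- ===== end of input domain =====

-- B replaces A's manual index loop by a regex-driven tokenize-then-map pass (idiomatic re.sub-style rewrite).

-- shared helper: one lowercase hex digit of f"{n:04x}" (n < 32, so the escape is "\u00" + two digits)
def pvHexDigit (n : Nat) : Char := if n < 10 then Char.ofNat (48 + n) else Char.ofNat (87 + n)

-- ===== PORT A =====
-- A's while loop over index i, recursing on the suffix of the string still to scan
def pvLoopA : List Char → String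
  | [] => ""
  | c :: rest =>
    if c = '"' then "\\\"" ++ pvLoopA rest
    else if c = '\\' then
      match h : rest with
      | next :: rest2 =>
        if next ∈ ['n','r','t','b','f','"','\\','/'] then
          ("\\" ++ String.mk [next]) ++ pvLoopA rest2
        else if next = 'u' then
          match h2 : rest2 with
          | a :: b :: c2 :: d :: rest3 => String.mk ['\\','u',a,b,c2,d] ++ pvLoopA rest3
          | _ => "\\\\" ++ pvLoopA rest   -- i + 5 < len(s) fails: fall through, i += 1
        else "\\\\" ++ pvLoopA rest       -- (the `next == "\\"` elif is subsumed by the `in 'nrtbf"\\/'` test)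
      | [] => "\\\\" ++ pvLoopA []
    else if c = '\n' then "\\n" ++ pvLoopA rest
    else if c = '\r' then "\\r" ++ pvLoopA rest
    else if c = '\t' then "\\t" ++ pvLoopA rest
    else if c.toNat < 32 then
      ("\\u00" ++ String.mk [pvHexDigit (c.toNat / 16), pvHexDigit (c.toNat % 16)]) ++ pvLoopA rest
    else String.mk [c] ++ pvLoopA rest
  termination_by l => l.length
  decreasing_by all_goals (simp_all; try omega)

def serialize_string_py (s : String) : String := "\"" ++ pvLoopA s.toList ++ "\""

-- ===== PORT B =====
-- the compiled regex  \\[nrtbf"\\/] | \\u[\s\S]{4} | [\s\S] , matched left to right (re.findall)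
def pvTokens : List Char → List (List Char)
  | [] => []
  | c :: rest =>
    if c = '\\' then
      match h : rest with
      | next :: rest2 =>
        if next ∈ ['n','r','t','b','f','"','\\','/'] then [c, next] :: pvTokens rest2
        else if next = 'u' then
          match h2 : rest2 with
          | a :: b :: c2 :: d :: rest3 => [c, next, a, b, c2, d] :: pvTokens rest3
          | _ => [c] :: pvTokens rest
        else [c] :: pvTokens rest
      | [] => [c] :: pvTokens []
    else [c] :: pvTokens rest
  termination_by l => l.length
  decreasing_by all_goals (simp_all; try omega)

-- the _SIMPLE dict
def pvSimple : PySem.Dict Char String :=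
  PySem.Dict.ofList [('"', "\\\""), ('\\', "\\\\"), ('\n', "\\n"), ('\r', "\\r"), ('\t', "\\t")]

-- _escape_token
def pvEscapeToken (t : List Char) : String :=
  if t.length > 1 then String.mk t
  else match t with
  | [c] =>
    match pvSimple.get? c with
    | some v => v
    | none =>
      if c.toNat < 32 then "\\u00" ++ String.mk [pvHexDigit (c.toNat / 16), pvHexDigit (c.toNat % 16)]
      else String.mk [c]
  | _ => String.mk t

def serialize_string_py_alt (s : String) : String :=
  "\"" ++ String.join ((pvTokens s.toList).map pvEscapeToken) ++ "\""

-- ===== PRECONDITION & SPEC =====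
def Spec_serialize_string_py (s : String) (out : String) : Prop := out = serialize_string_py_alt s
instance (s : String) (out : String) : Decidable (Spec_serialize_string_py s out) := by unfold Spec_serialize_string_py; infer_instance

-- ===== CLAIM (what is proved, stated in full; the proofs are below) =====
def Claim_equal_serialize_string_py : Prop := ∀ (s : String), Dom_serialize_string_py s → Spec_serialize_string_py s (serialize_string_py s)

-- ===== LEMMAS AND PROOFS =====

theorem pvJoin_foldl (a : String) (l : List String) :
    List.foldl (fun r s => r ++ s) a l = a ++ List.foldl (fun r s => r ++ s) "" l := by
  induction l generalizing a with
  | nil => simp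
  | cons x xs ih => rw [List.foldl, List.foldl, ih (a ++ x), ih ("" ++ x)]; simp [String.append_assoc]

theorem pvJoin_cons (s : String) (l : List String) : String.join (s :: l) = s ++ String.join l := by
  show List.foldl (fun r s => r ++ s) "" (s :: l) = _
  rw [List.foldl, pvJoin_foldl]; simp [String.join]

theorem pvJoin_nil : String.join ([] : List String) = "" := rfl

theorem pvToList_mk (a : List Char) : (String.mk a).toList = a := (String.ofList_eq.mp rfl).symm

theorem pvBsMk (c : Char) : "\\" ++ String.mk [c] = String.mk ['\\', c] := by
  apply String.toList_inj.mp; simp [pvToList_mk]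

theorem pvSimple_eq : pvSimple = PySem.Dict.mk [('"', "\\\""), ('\\', "\\\\"), ('\n', "\\n"), ('\r', "\\r"), ('\t', "\\t")] := by decide

theorem pvLoopA_eq_tokens (l : List Char) :
    pvLoopA l = String.join ((pvTokens l).map pvEscapeToken) := by
  induction l using pvLoopA.induct <;>
    (rw [pvLoopA.eq_def, pvTokens.eq_def]
     simp_all [pvEscapeToken, pvSimple_eq, PySem.Dict.get?_mk_cons, pvJoin_cons, pvJoin_nil, pvBsMk]
     try (apply String.toList_inj.mp; split_ifs <;> first | omega | simp_all [pvToList_mk, eq_comm, PySem.Dict.get?]))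

-- ===== VERDICT (by name: the statement is the Claim_ definition above) =====
theorem serialize_string_py_spec : Claim_equal_serialize_string_py := by
  intro s _
  unfold Spec_serialize_string_py serialize_string_py serialize_string_py_alt
  rw [pvLoopA_eq_tokens]
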